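-- pv_equiv track=rewrite | github.com/RohanChimbaikar/Aura | backend/aura-model-v1/aura_v2r_carrier_bank_tester.py | majority_vote_repeated_nibbles
-- ===== SOURCE A (Python) =====
-- def nibble_to_bits4(n):
--     n = int(n) & 0x0F
--     return [(n >> 3) & 1, (n >> 2) & 1, (n >> 1) & 1, n & 1]
--
-- def bits4_to_nibble(bits4):
--     bits4 = [int(b) & 1 for b in bits4]
--     return (bits4[0] << 3) | (bits4[1] << 2) | (bits4[2] << 1) | bits4[3]
--
-- def majority_vote_nibble_triplet(n0, n1, n2):
--     b0 = nibble_to_bits4(n0)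
--     b1 = nibble_to_bits4(n1)
--     b2 = nibble_to_bits4(n2)
--
--     voted = []
--     for i in range(4):
--         s = b0[i] + b1[i] + b2[i]
--         voted.append(1 if s >= 2 else 0)
--     return bits4_to_nibble(voted)
--
-- def majority_vote_repeated_nibbles(pred_nibbles, repeat_factor=3):
--     assert len(pred_nibbles) % repeat_factor == 0
--     out = []
--     for i in range(0, len(pred_nibbles), repeat_factor):
--         group = pred_nibbles[i:i + repeat_factor]
--
--         if repeat_factor == 3:
--             out.append(majority_vote_nibble_triplet(group[0], group[1], group[2]))
--         else:
--             bit_lists = [nibble_to_bits4(n) for n in group]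
--             voted_bits = []
--             for b in range(4):
--                 s = sum(x[b] for x in bit_lists)
--                 voted_bits.append(1 if s >= (repeat_factor // 2 + 1) else 0)
--             out.append(bits4_to_nibble(voted_bits))
--     return out
-- ===== SOURCE B (Python) =====
-- def _plane(vals, p):
--     return [(v >> (3 - p)) & 1 for v in vals]
--
-- def _vote_plane(plane, rf, thr):
--     return [1 if sum(plane[i:i + rf]) >= thr else 0
--             for i in range(0, len(plane), rf)]
--
-- def majority_vote_repeated_nibbles(pred_nibbles, repeat_factor=3):
--     assert len(pred_nibbles) % repeat_factor == 0
--     vals = [int(n) & 0x0F for n in pred_nibbles]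
--     thr = repeat_factor // 2 + 1
--     v0 = _vote_plane(_plane(vals, 0), repeat_factor, thr)
--     v1 = _vote_plane(_plane(vals, 1), repeat_factor, thr)
--     v2 = _vote_plane(_plane(vals, 2), repeat_factor, thr)
--     v3 = _vote_plane(_plane(vals, 3), repeat_factor, thr)
--     return [(a << 3) | (b << 2) | (c << 1) | d
--             for a, b, c, d in zip(v0, v1, v2, v3)]
-- ===== Notes on version B (the rewrite author's own statement) =====
-- stated objective: alternative
-- what changed: B decomposes the work by bit plane: it materializes four bit-plane lists once, majority-votes each plane independently over windows of repeat_factor, and recombines the four voted planes per group, instead of A's per-group scan that rebuilds all four bit lists inside every group (with a special-cased triplet path for repeat_factor=3).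
import Mathlib
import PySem

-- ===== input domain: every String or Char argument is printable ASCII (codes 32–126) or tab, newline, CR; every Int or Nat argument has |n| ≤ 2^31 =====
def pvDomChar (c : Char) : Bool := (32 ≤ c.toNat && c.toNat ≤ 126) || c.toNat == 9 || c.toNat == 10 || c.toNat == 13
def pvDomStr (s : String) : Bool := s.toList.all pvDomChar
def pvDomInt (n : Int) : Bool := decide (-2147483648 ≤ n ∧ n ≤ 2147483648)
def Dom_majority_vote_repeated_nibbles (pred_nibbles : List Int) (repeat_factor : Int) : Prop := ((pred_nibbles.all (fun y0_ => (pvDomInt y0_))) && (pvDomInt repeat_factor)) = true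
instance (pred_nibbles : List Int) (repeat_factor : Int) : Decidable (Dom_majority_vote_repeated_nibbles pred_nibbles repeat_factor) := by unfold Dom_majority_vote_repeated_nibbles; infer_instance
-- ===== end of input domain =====

-- B votes each of the four bit planes over the whole input at once and recombines per group,
-- instead of A's per-group rebuild of all four bit lists (objective: alternative decomposition).

-- ===== PORT A =====
-- `int(n) & 0x0F` = n % 16 on Int (Python % with positive modulus = Lean's Int.emod, exact);
-- `>> k` / `& 1` / `|` / `<< k` are Lean's `>>>` / PySem.Int.band / PySem.Int.bor / `<<<` (Python-exact).
def nibble_to_bits4 (n : Int) : List Int :=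
  let m := n % 16
  [PySem.Int.band (m >>> (3:Nat)) 1, PySem.Int.band (m >>> (2:Nat)) 1,
   PySem.Int.band (m >>> (1:Nat)) 1, PySem.Int.band m 1]

-- bits4[i]: IndexError impossible at every call site (the argument always has length 4)
def bits4_to_nibble (bits4 : List Int) : Int :=
  let bits4 := bits4.map (fun b => PySem.Int.band b 1)
  PySem.Int.bor (PySem.Int.bor (PySem.Int.bor (((PySem.List.pyGet? bits4 0).getD 0) <<< (3:Nat))
    (((PySem.List.pyGet? bits4 1).getD 0) <<< (2:Nat))) (((PySem.List.pyGet? bits4 2).getD 0) <<< (1:Nat)))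
    ((PySem.List.pyGet? bits4 3).getD 0)

def majority_vote_nibble_triplet (n0 n1 n2 : Int) : Int :=
  let b0 := nibble_to_bits4 n0
  let b1 := nibble_to_bits4 n1
  let b2 := nibble_to_bits4 n2
  let voted := (PySem.List.pyRange 0 4 1).foldl (fun voted i =>
    let s := (PySem.List.pyGet? b0 i).getD 0 + (PySem.List.pyGet? b1 i).getD 0 +
             (PySem.List.pyGet? b2 i).getD 0
    voted ++ [if s ≥ 2 then (1:Int) else 0]) []
  bits4_to_nibble voted

-- the `assert` raises (AssertionError, or ZeroDivisionError at repeat_factor = 0) unless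
-- len % repeat_factor == 0: exactly those inputs are excluded by Pre_ below
def majority_vote_repeated_nibbles (pred_nibbles : List Int) (repeat_factor : Int) : List Int :=
  (PySem.List.pyRange 0 pred_nibbles.length repeat_factor).foldl (fun out i =>
    let group := PySem.List.slice pred_nibbles (some i) (some (i + repeat_factor))
    out ++ [if repeat_factor == 3 then
        -- group[0], group[1], group[2]: IndexError unreachable once the assert passed
        majority_vote_nibble_triplet ((PySem.List.pyGet? group 0).getD 0)
          ((PySem.List.pyGet? group 1).getD 0) ((PySem.List.pyGet? group 2).getD 0)
      else
        let bit_lists := group.map nibble_to_bits4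
        let voted_bits := (PySem.List.pyRange 0 4 1).foldl (fun vb b =>
          let s := (bit_lists.map (fun x => (PySem.List.pyGet? x b).getD 0)).sum
          vb ++ [if s ≥ PySem.Int.floordiv repeat_factor 2 + 1 then (1:Int) else 0]) []
        bits4_to_nibble voted_bits]) []

-- ===== PORT B =====
-- hand port of Python's 4-ary zip (stops at the shortest list); exact
def pvZip4 {α : Type} : List α → List α → List α → List α → List (α × α × α × α)
  | a :: as, b :: bs, c :: cs, d :: ds => (a, b, c, d) :: pvZip4 as bs cs ds
  | _, _, _, _ => []

def pvPlane (vals : List Int) (p : Nat) : List Int :=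
  vals.map (fun (v : Int) => PySem.Int.band (v >>> (3 - p)) 1)

def pvVotePlane (plane : List Int) (rf thr : Int) : List Int :=
  (PySem.List.pyRange 0 plane.length rf).map (fun i =>
    if (PySem.List.slice plane (some i) (some (i + rf))).sum ≥ thr then (1:Int) else 0)

def majority_vote_repeated_nibbles_alt (pred_nibbles : List Int) (repeat_factor : Int) : List Int :=
  let vals := pred_nibbles.map (fun n => n % 16)   -- int(n) & 0x0F
  let thr := PySem.Int.floordiv repeat_factor 2 + 1
  let v0 := pvVotePlane (pvPlane vals 0) repeat_factor thr
  let v1 := pvVotePlane (pvPlane vals 1) repeat_factor thr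
  let v2 := pvVotePlane (pvPlane vals 2) repeat_factor thr
  let v3 := pvVotePlane (pvPlane vals 3) repeat_factor thr
  (pvZip4 v0 v1 v2 v3).map (fun (q : Int × Int × Int × Int) =>
    PySem.Int.bor (PySem.Int.bor (PySem.Int.bor (q.1 <<< (3:Nat)) (q.2.1 <<< (2:Nat))) (q.2.2.1 <<< (1:Nat))) q.2.2.2)

-- ===== PRECONDITION & SPEC =====
-- Pre_ excludes exactly the inputs where A raises: repeat_factor = 0 (ZeroDivisionError in the
-- assert's `%`) and len(pred_nibbles) % repeat_factor ≠ 0 (AssertionError).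
def Pre_majority_vote_repeated_nibbles (pred_nibbles : List Int) (repeat_factor : Int) : Prop :=
  repeat_factor ≠ 0 ∧ PySem.Int.mod (pred_nibbles.length : Int) repeat_factor = 0
instance (pred_nibbles : List Int) (repeat_factor : Int) : Decidable (Pre_majority_vote_repeated_nibbles pred_nibbles repeat_factor) := by unfold Pre_majority_vote_repeated_nibbles; infer_instance

def pvWitness_majority_vote_repeated_nibbles : List Int × Int := ([1, 9, 3, 12, 4, 12], 3)

def Spec_majority_vote_repeated_nibbles (pred_nibbles : List Int) (repeat_factor : Int) (out : List Int) : Prop := out = majority_vote_repeated_nibbles_alt pred_nibbles repeat_factor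
instance (pred_nibbles : List Int) (repeat_factor : Int) (out : List Int) : Decidable (Spec_majority_vote_repeated_nibbles pred_nibbles repeat_factor out) := by unfold Spec_majority_vote_repeated_nibbles; infer_instance

-- ===== CLAIM (what is proved, stated in full; the proofs are below) =====
def Claim_equal_majority_vote_repeated_nibbles : Prop := ∀ (pred_nibbles : List Int) (repeat_factor : Int), Dom_majority_vote_repeated_nibbles pred_nibbles repeat_factor → Pre_majority_vote_repeated_nibbles pred_nibbles repeat_factor → Spec_majority_vote_repeated_nibbles pred_nibbles repeat_factor (majority_vote_repeated_nibbles pred_nibbles repeat_factor)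

-- ===== LEMMAS AND PROOFS =====

-- proof-side abbreviations: bit p of a nibble, one plane's vote for one group, the recombination
def pvBitFn (p : Nat) : Int → Int := fun n => PySem.Int.band ((n % 16) >>> (3 - p)) 1
def pvVote (G : List Int) (thr : Int) (p : Nat) : Int :=
  if (G.map (pvBitFn p)).sum ≥ thr then 1 else 0
def pvCombine (a b c d : Int) : Int :=
  PySem.Int.bor (PySem.Int.bor (PySem.Int.bor (a <<< (3:Nat)) (b <<< (2:Nat))) (c <<< (1:Nat))) d

lemma pvBand01 (c : Prop) [Decidable c] :
    PySem.Int.band (if c then (1:Int) else 0) 1 = if c then 1 else 0 := by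
  split <;> decide

lemma pvBit0 (x : Int) : (PySem.List.pyGet? (nibble_to_bits4 x) 0).getD 0 = pvBitFn 0 x := rfl
lemma pvBit1 (x : Int) : (PySem.List.pyGet? (nibble_to_bits4 x) 1).getD 0 = pvBitFn 1 x := rfl
lemma pvBit2 (x : Int) : (PySem.List.pyGet? (nibble_to_bits4 x) 2).getD 0 = pvBitFn 2 x := rfl
lemma pvBit3 (x : Int) : (PySem.List.pyGet? (nibble_to_bits4 x) 3).getD 0 = pvBitFn 3 x := by
  simp [nibble_to_bits4, pvBitFn, PySem.List.pyGet?, PySem.List.pyIdx?]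

-- bits4_to_nibble on a literal 4-list of 0/1 ifs is pvCombine
lemma pvNib4 (c0 c1 c2 c3 : Prop) [Decidable c0] [Decidable c1] [Decidable c2] [Decidable c3] :
    bits4_to_nibble [if c0 then 1 else 0, if c1 then 1 else 0, if c2 then 1 else 0, if c3 then 1 else 0] =
      pvCombine (if c0 then 1 else 0) (if c1 then 1 else 0) (if c2 then 1 else 0) (if c3 then 1 else 0) := by
  show pvCombine (PySem.Int.band _ 1) (PySem.Int.band _ 1) (PySem.Int.band _ 1) (PySem.Int.band _ 1) = _
  rw [pvBand01, pvBand01, pvBand01, pvBand01]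

-- A's else-branch on one group equals the four plane votes recombined
lemma pvElse_eq (G : List Int) (rf : Int) :
    (let bit_lists := G.map nibble_to_bits4
     let voted_bits := (PySem.List.pyRange 0 4 1).foldl (fun vb b =>
        let s := (bit_lists.map (fun x => (PySem.List.pyGet? x b).getD 0)).sum
        vb ++ [if s ≥ PySem.Int.floordiv rf 2 + 1 then (1:Int) else 0]) []
     bits4_to_nibble voted_bits) =
    pvCombine (pvVote G (PySem.Int.floordiv rf 2 + 1) 0) (pvVote G (PySem.Int.floordiv rf 2 + 1) 1)
      (pvVote G (PySem.Int.floordiv rf 2 + 1) 2) (pvVote G (PySem.Int.floordiv rf 2 + 1) 3) := by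
  have h4 : PySem.List.pyRange 0 4 1 = [0, 1, 2, 3] := by decide
  simp only [h4, List.foldl_cons, List.foldl_nil, List.nil_append, List.cons_append,
    List.map_map, Function.comp_def, pvBit0, pvBit1, pvBit2, pvBit3]
  rw [pvNib4]
  simp only [pvVote, pvCombine]
  rfl

-- A's triplet equals the general formula at rf = 3 (threshold 2)
lemma pvTriplet_eq (a b c : Int) :
    majority_vote_nibble_triplet a b c =
      pvCombine (pvVote [a, b, c] 2 0) (pvVote [a, b, c] 2 1) (pvVote [a, b, c] 2 2) (pvVote [a, b, c] 2 3) := by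
  have h4 : PySem.List.pyRange 0 4 1 = [0, 1, 2, 3] := by decide
  unfold majority_vote_nibble_triplet
  simp only [h4, List.foldl_cons, List.foldl_nil, List.nil_append, List.cons_append,
    pvBit0, pvBit1, pvBit2, pvBit3]
  rw [pvNib4]
  simp only [pvVote, List.map_cons, List.map_nil, List.sum_cons, List.sum_nil, add_zero, add_assoc]

lemma pvZip4_map {α β : Type} (l : List α) (f0 f1 f2 f3 : α → β) :
    pvZip4 (l.map f0) (l.map f1) (l.map f2) (l.map f3) =
      l.map (fun x => (f0 x, f1 x, f2 x, f3 x)) := by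
  induction l with
  | nil => rfl
  | cons a t ih => simp [pvZip4, ih]

lemma pvSlice_map {α β : Type} (f : α → β) (l : List α) (a b : Int) (h0 : 0 ≤ a) (h1 : 0 ≤ b) :
    PySem.List.slice (l.map f) (some a) (some b) = (PySem.List.slice l (some a) (some b)).map f := by
  rw [PySem.List.slice_toNat _ h0 h1, PySem.List.slice_toNat _ h0 h1, List.map_take, List.map_drop]

lemma pvRange_neg (b s : Int) (hb : 0 ≤ b) (hs : s < 0) : PySem.List.pyRange 0 b s = [] := by
  unfold PySem.List.pyRange
  rw [if_neg (by omega), if_neg (by omega : ¬ (0:Int) < s), if_neg (by omega : ¬ b < 0)]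
  rfl

lemma pvPlane_eq (xs : List Int) (p : Nat) :
    pvPlane (xs.map (fun n => n % 16)) p = xs.map (pvBitFn p) := by
  simp only [pvPlane, List.map_map]; rfl

-- B as a map over the group starts
lemma pvB_eq_map (xs : List Int) (rf : Int) :
    majority_vote_repeated_nibbles_alt xs rf =
      (PySem.List.pyRange 0 xs.length rf).map (fun i =>
        pvCombine
          (if (PySem.List.slice (xs.map (pvBitFn 0)) (some i) (some (i + rf))).sum ≥ PySem.Int.floordiv rf 2 + 1 then 1 else 0)
          (if (PySem.List.slice (xs.map (pvBitFn 1)) (some i) (some (i + rf))).sum ≥ PySem.Int.floordiv rf 2 + 1 then 1 else 0)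
          (if (PySem.List.slice (xs.map (pvBitFn 2)) (some i) (some (i + rf))).sum ≥ PySem.Int.floordiv rf 2 + 1 then 1 else 0)
          (if (PySem.List.slice (xs.map (pvBitFn 3)) (some i) (some (i + rf))).sum ≥ PySem.Int.floordiv rf 2 + 1 then 1 else 0)) := by
  unfold majority_vote_repeated_nibbles_alt
  simp only [pvVotePlane, pvPlane_eq, List.length_map]
  rw [pvZip4_map, List.map_map]
  rfl

lemma pvMain (xs : List Int) (rf : Int) (hrf0 : rf ≠ 0)
    (hmod : PySem.Int.mod (xs.length : Int) rf = 0) :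
    majority_vote_repeated_nibbles xs rf = majority_vote_repeated_nibbles_alt xs rf := by
  rcases lt_or_gt_of_ne hrf0 with hneg | hpos
  · rw [pvB_eq_map]
    unfold majority_vote_repeated_nibbles
    rw [pvRange_neg _ _ (by positivity) hneg]
    rfl
  · have hdvd : rf ∣ (xs.length : Int) := (PySem.Int.mod_eq_zero_iff_dvd _ _).mp hmod
    rw [pvB_eq_map]
    unfold majority_vote_repeated_nibbles
    rw [PySem.List.foldl_append_singleton_eq_map, List.nil_append]
    apply List.map_congr_left
    intro i hi
    obtain ⟨h0i, hilen, hdvdi⟩ := (PySem.List.mem_pyRange_iff_of_pos hpos i).mp hi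
    rw [sub_zero] at hdvdi
    have hle : i + rf ≤ (xs.length : Int) := by
      obtain ⟨a, ha⟩ := hdvdi
      obtain ⟨b, hb⟩ := hdvd
      have hab : a + 1 ≤ b := by nlinarith
      have h2 : rf * (a + 1) ≤ rf * b := mul_le_mul_of_nonneg_left hab (le_of_lt hpos)
      nlinarith
    -- rewrite the four B-side slices as maps of the group
    have hs : ∀ p : Nat,
        (PySem.List.slice (xs.map (pvBitFn p)) (some i) (some (i + rf))).sum =
          ((PySem.List.slice xs (some i) (some (i + rf))).map (pvBitFn p)).sum := by
      intro p; rw [pvSlice_map _ _ _ _ h0i (by omega)]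
    by_cases h3 : rf = 3
    · subst h3
      -- the group is a literal triple
      have hlen3 : (PySem.List.slice xs (some i) (some (i + 3))).length = 3 := by
        rw [PySem.List.slice_toNat _ h0i (by omega), List.length_take, List.length_drop]
        omega
      obtain ⟨a, b, c, hG⟩ : ∃ a b c, PySem.List.slice xs (some i) (some (i + 3)) = [a, b, c] := by
        rcases e : PySem.List.slice xs (some i) (some (i + 3)) with _ | ⟨a, _ | ⟨b, _ | ⟨c, _ | _⟩⟩⟩ <;>
          simp [e] at hlen3 ⊢
      have g0 : (PySem.List.pyGet? ([a, b, c] : List Int) 0).getD 0 = a := rfl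
      have g1 : (PySem.List.pyGet? ([a, b, c] : List Int) 1).getD 0 = b := rfl
      have g2 : (PySem.List.pyGet? ([a, b, c] : List Int) 2).getD 0 = c := rfl
      have hthr : PySem.Int.floordiv 3 2 + 1 = 2 := by decide
      simp only [hs]
      rw [if_pos (by decide : ((3:Int) == 3) = true), hG, g0, g1, g2, pvTriplet_eq, hthr]
      simp only [pvVote, List.map_cons, List.map_nil, List.sum_cons, List.sum_nil, add_zero,
        ge_iff_le]
    · rw [if_neg (by simpa using h3)]
      simp only [hs]
      rw [pvElse_eq]
      rfl

-- ===== VERDICT (by name: the statement is the Claim_ definition above) =====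
theorem majority_vote_repeated_nibbles_spec : Claim_equal_majority_vote_repeated_nibbles := by
  intro pred_nibbles repeat_factor _ hpre
  exact pvMain pred_nibbles repeat_factor hpre.1 hpre.2
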